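/- GENERATED by mk_final_copies.py from the proof of the farm's unit `start_decoder.C5a` (farm:start_decoder.C5a.1: Lemmas.lean) as the
   re-elaboration sweep compiled it — do not edit. -/
import Asan.CheckWalk
import Vorbis.Spec.Reader
import Vorbis.Spec.StartDecoderC4
import Vorbis.Spec.Units.start_decoder_C5a

/-!
  The unit `start_decoder.C5a` (0x114594 … 0x1145e4, the join tail 0x114651 … 0x114662, 0x11483c … 0x114844).
      C5aWin, c5a_carry      the carry of `Frame` / `Cur` / the struct / the `lengths` array over the segment's own stores
                             (return addresses below `R`, the statistic `[f + 16, f + 20)`)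
      c5a_to5L               PURE: `In5L … e 0` from `InC5` (dense book) and `c5a_carry`'s results
      c5a_toC6               PURE: `InC6` from `InC5` (sparse book, `4·total < E`) and `c5a_carry`'s results
      c5a_to5M               PURE: `In5M` from `InC5` and what `Cur.alloc_call` / `Cur.alloc_fail_any` return
-/

open X86 X86.User Asan Vorbis Vorbis.Spec Vorbis.Spec.StartDecoder

set_option maxRecDepth 100000
set_option maxHeartbeats 4000000

namespace Vorbis.Spec.start_decoder_C5a

/-- **A window segment C5a writes by itself** (before the call of setup_malloc): the stack below the steady `R` (the return address
of a check call, the check routine's frame), or the statistic `f->setup_temp_memory_required` = `[f + 16, f + 20)` (the unchecked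
store 0x1145d7). -/
def C5aWin (g : Ghost) (w : Span) : Prop :=
  (g.R - 408 ≤ w.lo ∧ w.hi ≤ g.R) ∨ (g.f + 16 ≤ w.lo ∧ w.hi ≤ g.f + 20)

/-- **The carry of segment C5a**: over a stretch that writes only `C5aWin` windows (no shadow byte), `Frame` and `Cur` at the new
state and program counter, `cb(i)` unmoved, every setup block of the arena kept, every field of the struct, and the bytes of the
`lengths` array (a setup block or the temp block P1: inside the arena's buffer either way). -/
theorem c5a_carry {u₀ : State} {g : Ghost} {i : Nat} {A2 A3 Ai : Arena} {A : Arena × List Obj} {lengths total : Nat}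
    {pc' : Word} {v w : State} {ws : List Span} (h : InC5 u₀ g i A2 A3 Ai A lengths total v)
    (hs : Mem.SameExcept ws v.mem w.mem) (hun : ShadowUntouched v.mem w.mem) (hq : ∀ x, x ∈ ws → C5aWin g x)
    (hrip : w.rip = pc') (hrsp : w.reg .rsp = v.reg .rsp) (hcode : CodeOK u₀ w.mem) (hinv : abiInv w)
    (hr14 : w.reg .r14 = v.reg .r14) :
    Frame u₀ g pc' A w ∧ Cur g i A2 A3 Ai A w ∧ g.cb w.mem i = g.cb v.mem i ∧
      Codebook.SameFields v.mem w.mem (g.cb v.mem i) ∧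
      Mem.EqOn lengths (lengths + (Codebook.entries v.mem (g.cb v.mem i)).toNat) v.mem w.mem ∧
      lengths + (Codebook.entries v.mem (g.cb v.mem i)).toNat ≤ 2 ^ 64 := by
  have hfr := h.frame
  have hpos : Pos g A := Pos.of hfr h.cur
  have hm0 : MInv g i A2 A3 Ai A v.mem := MInv.of hfr h.cur
  have hcw := hm0.c_where
  have p1 := hpos.r_eq
  have p2 := hpos.ra_lo
  have p3 := hpos.ra_hi
  have p4 := hpos.f_lo
  have p5 := hpos.f_hi
  have p6 := hpos.f_stack
  have p7 := hpos.objOut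
  have p9 := hpos.ar_lo
  have p10 := hpos.ar_hi
  have p11 := hpos.ar_stack
  -- every window as an `OkWinA` window of the carry layer
  have hokA : ∀ x, x ∈ ws → OkWinA g Ai A (g.cb v.mem i) x := by
    intro x hx
    have k := hq x hx
    unfold C5aWin at k
    unfold OkWinA OkWin OkWin0
    omega
  -- the arena's four fields of `*f` are not written
  have ha' : ArenaOK A.1 A.2 w.mem g.f := by
    apply hm0.sd.arena.frame (by simp only [voff]; omega)
    simp only [voff]
    apply hs.eqOn
    intro x hx
    have k := hq x hx
    unfold C5aWin at k
    omega
  have hb : Bits (g.Blk A) g.len w.mem g.f := by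
    apply bits_kept hpos hm0.sd.bits hs
    intro x hx
    have k := hq x hx
    unfold C5aWin at k
    omega
  have hx : BlkLive (listBlk g.extra) (g.Live A) := hm0.sd.env.live.sub (fun B hB => runBlk_extra hB)
  obtain ⟨hm1, hcb⟩ := hm0.move hpos rfl hs hokA (Arena.Extends.refl _) ha' (hm0.shadow.untouched hun) hx hb
  have hF : Frame u₀ g pc' A w := hm1.frame hfr hrip (hrsp.trans hfr.rsp) hcode hinv hfr.offText hfr.ext
  have hC : Cur g i A2 A3 Ai A w := by
    apply hm1.cur h.cur.hand
    rw [hcb, hr14]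
    exact h.cur.r14
  -- the struct and the `lengths` array lie in the arena's buffer: no window meets it
  have hstruct : (Codebook.block (g.cb v.mem i)).Kept v.mem w.mem := by
    apply Block.Kept.of_sameExcept hs
    · intro x hx
      have k := hq x hx
      unfold C5aWin at k
      simp only [vblock, voff]
      omega
    · simp only [vblock, voff]
      omega
  have hsf := Codebook.SameFields.of_kept hstruct
  obtain ⟨lw1, lw2, lw3, lw4⟩ := C4.lengths_where h.cur.sd.arena (fun B hB => hB.1) h.place
  have hlen : (Block.mk lengths (Codebook.entries v.mem (g.cb v.mem i)).toNat).Kept v.mem w.mem := by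
    apply Block.Kept.of_sameExcept hs
    · intro x hx
      have k := hq x hx
      unfold C5aWin at k
      simp only []
      omega
    · simp only []
      omega
  exact ⟨hF, hC, hcb, hsf, hlen.same, hlen.inside⟩

/-- **`In5L … e 0` from `InC5` for a dense book** (arm (1) of C5a: `sparse = 0`, the tail read it as 0 and reset `j` and
`sorted_count`): `Frame`, `Cur`, `cb(i)`, the struct's fields and the `lengths` bytes are `c5a_carry`'s results at the loop head. -/
theorem c5a_to5L {u₀ : State} {g : Ghost} {i : Nat} {A2 A3 Ai : Arena} {A : Arena × List Obj} {lengths total : Nat}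
    {v w : State} (h : InC5 u₀ g i A2 A3 Ai A lengths total v) (hsp0 : Codebook.sparse v.mem (g.cb v.mem i) = 0)
    (hF : Frame u₀ g L.start_decoder.loop10 A w) (hC : Cur g i A2 A3 Ai A w) (hcb : g.cb w.mem i = g.cb v.mem i)
    (hsf : Codebook.SameFields v.mem w.mem (g.cb v.mem i))
    (heq : Mem.EqOn lengths (lengths + (Codebook.entries v.mem (g.cb v.mem i)).toNat) v.mem w.mem)
    (hin : lengths + (Codebook.entries v.mem (g.cb v.mem i)).toNat ≤ 2 ^ 64)
    (hr13 : w.reg .r13 = addr 0) (hrbx : w.reg .rbx = v.reg .rbx) (hr12 : w.reg .r12 = addr 0)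
    (hrbp : w.reg .rbp = addr 0) :
    In5L u₀ g i A2 A3 Ai A lengths (Codebook.entries v.mem (g.cb v.mem i)) 0 w := by
  obtain ⟨k1', fresh', place'⟩ := C4.book_carry hsf h.k1 h.fresh h.place
  have hs0 : Codebook.sparse w.mem (g.cb v.mem i) = 0 := by
    rw [hsf.sparse]
    exact hsp0
  have hnn := h.k1.ent_nonneg
  exact
    { frame := hF
      cur := hC
      k1 := by rw [hcb]; exact k1'
      sparse0 := by rw [hcb]; exact hs0
      r13 := by rw [hcb, hs0]; exact hr13
      rbx := by rw [hrbx]; exact h.rbx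
      lenL := by rw [hcb, hsf.entries]; exact h.lenL.same heq hin
      place := by rw [hcb]; exact place'
      fresh := by rw [hcb]; exact fresh'
      r12 := hr12
      j_le := by
        rw [hcb, hsf.entries]
        exact hnn
      rbp := hrbp
      e_eq := by rw [hcb, hsf.entries] }

/-- **`InC6` from `InC5` for a book that stays sparse** (arm (2) of C5a: `sparse = 1` and `E >> 2 > total`, i.e. `4·total < E`; the
tail read `sparse` as 1): `count := total`. -/
theorem c5a_toC6 {u₀ : State} {g : Ghost} {i : Nat} {A2 A3 Ai : Arena} {A : Arena × List Obj} {lengths total : Nat}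
    {v w : State} (h : InC5 u₀ g i A2 A3 Ai A lengths total v) (hsp1 : Codebook.sparse v.mem (g.cb v.mem i) = 1)
    (hlt : 4 * (total : Int) < Codebook.entries v.mem (g.cb v.mem i))
    (hF : Frame u₀ g pc_C6 A w) (hC : Cur g i A2 A3 Ai A w) (hcb : g.cb w.mem i = g.cb v.mem i)
    (hsf : Codebook.SameFields v.mem w.mem (g.cb v.mem i))
    (heq : Mem.EqOn lengths (lengths + (Codebook.entries v.mem (g.cb v.mem i)).toNat) v.mem w.mem)
    (hin : lengths + (Codebook.entries v.mem (g.cb v.mem i)).toNat ≤ 2 ^ 64)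
    (hr13 : w.reg .r13 = addr 1) (hrbx : w.reg .rbx = v.reg .rbx) (hrbp : w.reg .rbp = v.reg .rbp) :
    InC6 u₀ g i A2 A3 Ai A lengths total w := by
  obtain ⟨k1', fresh', place'⟩ := C4.book_carry hsf h.k1 h.fresh h.place
  have hs1 : Codebook.sparse w.mem (g.cb v.mem i) = 1 := by
    rw [hsf.sparse]
    exact hsp1
  obtain ⟨hl', hu'⟩ := C4.lengths_carry heq hin h.lenL
  exact
    { frame := hF
      cur := hC
      k1 := by rw [hcb]; exact k1'
      r13 := by rw [hcb, hs1]; exact hr13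
      rbx := by rw [hrbx]; exact h.rbx
      rbp := by rw [hrbp]; exact h.rbp
      lenL := by rw [hcb, hsf.entries]; exact hl'
      place := by rw [hcb]; exact place'
      sparse_count := by
        rw [hcb, hsf.entries, hu']
        intro _
        exact ⟨h.sparse_total hsp1, hlt⟩
      dense_count := by
        rw [hcb]
        intro h0
        rw [hs1] at h0
        exact absurd h0 (by decide)
      fresh := by rw [hcb]; exact fresh' }

/-- The test of line 3799 as the code does it (`sar eax,2`): an arithmetic shift of a non-negative `int` is the division by 4. -/
theorem c5a_sar2 (n : Nat) (hn : n < 2 ^ 31) : ((BitVec.ofNat 32 n).sshiftRight 2).toInt = ((n / 4 : Nat) : Int) := by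
  have hm : (BitVec.ofNat 32 n).msb = false := by
    rw [BitVec.msb_eq_false_iff_two_mul_lt, BitVec.toNat_ofNat]
    omega
  have h1 : ((BitVec.ofNat 32 n).sshiftRight 2).toNat = n / 4 := by
    rw [BitVec.toNat_sshiftRight_of_msb_false hm, BitVec.toNat_ofNat, Nat.mod_eq_of_lt (by omega), Nat.shiftRight_eq_div_pow]
  rw [BitVec.toInt_eq_toNat_of_lt (by rw [h1]; omega), h1]

/-- **0x1145db, the join before `call setup_malloc`** (arm (3) of C5a, after the statistic `setup_temp_memory_required`): the
clauses of `In5M` but the allocator's result — the book is sparse, `codeword_lengths` is NULL, `rbx = lengths` = the temp block P1. -/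
structure Mid5a (u₀ : State) (g : Ghost) (i : Nat) (A2 A3 Ai : Arena) (A : Arena × List Obj) (lengths : Nat) (v : State) :
    Prop where
  frame : Frame u₀ g 0x1145db A v
  cur : Cur g i A2 A3 Ai A v
  k1 : Codebook.K1 v.mem (g.cb v.mem i)
  sparse1 : Codebook.sparse v.mem (g.cb v.mem i) = 1
  null : Codebook.codeword_lengths v.mem (g.cb v.mem i) = 0
  rbx : v.reg .rbx = addr lengths
  temps : TempsAre A.1 [(lengths, (Codebook.entries v.mem (g.cb v.mem i)).toNat)]
  lenL : LenL v.mem lengths (Codebook.entries v.mem (g.cb v.mem i)).toNat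
  fresh : Fresh7 v.mem (g.cb v.mem i)

/-- **`Mid5a` from `InC5` for a sparse book** and `c5a_carry`'s results at 0x1145db. -/
theorem c5a_toMid {u₀ : State} {g : Ghost} {i : Nat} {A2 A3 Ai : Arena} {A : Arena × List Obj} {lengths total : Nat}
    {v w : State} (h : InC5 u₀ g i A2 A3 Ai A lengths total v) (hsp1 : Codebook.sparse v.mem (g.cb v.mem i) = 1)
    (hF : Frame u₀ g 0x1145db A w) (hC : Cur g i A2 A3 Ai A w) (hcb : g.cb w.mem i = g.cb v.mem i)
    (hsf : Codebook.SameFields v.mem w.mem (g.cb v.mem i))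
    (heq : Mem.EqOn lengths (lengths + (Codebook.entries v.mem (g.cb v.mem i)).toNat) v.mem w.mem)
    (hin : lengths + (Codebook.entries v.mem (g.cb v.mem i)).toNat ≤ 2 ^ 64)
    (hrbx : w.reg .rbx = v.reg .rbx) : Mid5a u₀ g i A2 A3 Ai A lengths w := by
  obtain ⟨k1', fresh', _⟩ := C4.book_carry hsf h.k1 h.fresh h.place
  exact
    { frame := hF
      cur := hC
      k1 := by rw [hcb]; exact k1'
      sparse1 := by rw [hcb, hsf.sparse]; exact hsp1
      null := by rw [hcb, hsf.codeword_lengths]; exact h.place.sparse_null hsp1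
      rbx := by rw [hrbx]; exact h.rbx
      temps := by rw [hcb, hsf.entries]; exact h.place.sparse_temp hsp1
      lenL := by rw [hcb, hsf.entries]; exact h.lenL.same heq hin
      fresh := by rw [hcb]; exact fresh' }

/-- **A range inside the arena's buffer over `call setup_malloc`** (the temp block P1: no setup block, so `AllKept A.1.Blk` does
not speak of it): neither the pushed return address, nor the allocator's stack, nor its two fields of `*f`, nor any shadow byte is
in the arena's buffer. Both outcomes of the call. -/
theorem c5a_call_eqOn {g : Ghost} {A : Arena × List Obj} {m ms mr : Mem} {a : Word} {x sp n p lo hi : Nat} (hp : Pos g A)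
    (hmem : ms = m.writeLE a 8 x) (ha : a.toNat + 8 = g.R) (hsp : sp + 8 = g.R)
    (hs : Mem.SameExcept [⟨sp - 80, sp⟩, ⟨g.f + 8, g.f + 12⟩, ⟨g.f + 128, g.f + 132⟩, shadowSpan p (p + n)] ms mr)
    (hlo : A.1.B ≤ lo) (hhi : hi ≤ A.1.B + A.1.L) : Mem.EqOn lo hi m mr := by
  have p1 := hp.r_eq
  have p2 := hp.ra_hi
  have p3 := hp.ra_lo
  have p7 := hp.objOut
  have p10 := hp.ar_hi
  have p11 := hp.ar_stack
  have hpush : Mem.SameExcept [⟨g.R - 8, g.R⟩] m ms := by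
    rw [hmem]
    apply Mem.SameExcept.writeLE
    · omega
    · refine ⟨_, List.mem_cons_self, ?_, ?_⟩
      · simp only []
        omega
      · simp only []
        omega
  have e1 : Mem.EqOn lo hi m ms := by
    apply hpush.eqOn
    intro w hw
    rw [List.mem_singleton.mp hw]
    simp only []
    omega
  have e2 : Mem.EqOn lo hi ms mr := by
    apply hs.eqOn
    intro w hw
    simp only [List.mem_cons, List.mem_nil_iff, or_false] at hw
    rcases hw with rfl | rfl | rfl | rfl
    · simp only []
      omega
    · simp only []
      omega
    · simp only []
      omega
    · unfold shadowSpan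
      simp only []
      omega
  exact Mem.EqOn.trans e1 e2

/-- **`In5M` from the return of the allocator, pure part** (both arms): `Frame` and `Cur` at the returned state `w` for the ghost
`A'` (the grown one, or `A` itself), `cb(i)` unmoved, every setup block of `A` kept, the bytes of the temp block P1, and the
allocator's result. -/
theorem c5a_to5M {u₀ : State} {g : Ghost} {i : Nat} {A2 A3 Ai : Arena} {A A' : Arena × List Obj} {lengths : Nat} {v w : State}
    (h : Mid5a u₀ g i A2 A3 Ai A lengths v) (hF : Frame u₀ g L.start_decoder.cut110 A' w) (hC : Cur g i A2 A3 Ai A' w)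
    (hcb : g.cb w.mem i = g.cb v.mem i) (hkept : AllKept A.1.Blk v.mem w.mem)
    (htemps : A'.1.temps = A.1.temps) (hB : A'.1.B = A.1.B)
    (heq : Mem.EqOn lengths (lengths + (Codebook.entries v.mem (g.cb v.mem i)).toNat) v.mem w.mem)
    (hin : lengths + (Codebook.entries v.mem (g.cb v.mem i)).toNat ≤ 2 ^ 64)
    (hrbx : w.reg .rbx = v.reg .rbx)
    (halloc : w.reg .rax = 0 ∨ Since Ai A'.1 ⟨(w.reg .rax).toNat, (Codebook.entries v.mem (g.cb v.mem i)).toNat⟩) :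
    In5M u₀ g i A2 A3 Ai A' lengths w := by
  have hkI : AllKept Ai.Blk v.mem w.mem := fun B hB => hkept B (hB.mono h.cur.ages.exti)
  have hsf := C4.struct_same h.cur hkI
  have hfresh := h.fresh
  exact
    { frame := hF
      cur := hC
      k1 := by rw [hcb]; exact h.k1.frame hsf
      sparse1 := by rw [hcb, hsf.sparse]; exact h.sparse1
      null := by rw [hcb, hsf.codeword_lengths]; exact h.null
      rbx := by rw [hrbx]; exact h.rbx
      temps := by
        rw [hcb, hsf.entries]
        have ht := h.temps
        unfold TempsAre at ht ⊢
        rw [htemps, hB]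
        exact ht
      lenL := by rw [hcb, hsf.entries]; exact h.lenL.same heq hin
      fresh := by
        rw [hcb]
        exact ⟨⟨⟨by rw [hsf.lookup_type]; exact hfresh.lookup_type, by rw [hsf.lookup_values]; exact hfresh.lookup_values,
          by rw [hsf.multiplicands]; exact hfresh.multiplicands⟩,
          by rw [hsf.sorted_codewords]; exact hfresh.sorted_codewords, by rw [hsf.sorted_values]; exact hfresh.sorted_values⟩,
          by rw [hsf.codewords]; exact hfresh.codewords, by rw [hsf.sorted_entries]; exact hfresh.sorted_entries⟩
      alloc := by rw [hcb, hsf.entries]; exact halloc }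

/-- **Where `*f` is** (a stack object of stb_vorbis_open_memory, or an object of `A.2`): in the data space, and off the part of the
stack below the steady stack pointer `R`. -/
theorem c5a_obj_where {g : Ghost} {i : Nat} {A2 A3 Ai : Arena} {A : Arena × List Obj} {v : State} (h : Cur g i A2 A3 Ai A v)
    (hsh : ShadowInv A.2 g.frames' g.R v.mem) (hoff : ∀ o, o ∈ A.2 → L.textHi ≤ o.base) :
    0x119d40 ≤ g.f ∧ g.f + 1808 ≤ 0xC00000 ∧ (g.R ≤ g.f ∨ g.f + 1808 ≤ 0x700000 ∨ 0x800000 ≤ g.f) := by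
  have hl : LiveIn A.2 g.frames' g.f Off.sizeof.stb_vorbis := by
    apply h.hand.obj.mono
    intro o ho
    unfold Ghost.frames'
    rw [stackObjs_cons]
    rcases List.mem_append.mp ho with hs | ho'
    · exact List.mem_append_left _ (List.mem_append_right _ hs)
    · exact List.mem_append_right _ ho'
  have hw := hl.where_ hsh hoff (by simp only [voff]; omega)
  simp only [voff] at hw
  exact hw

/-- **`setup_malloc`'s precondition at 0x1145e4**: the state `s` at the callee's entry has the memory of the join 0x1145db but for
the pushed return address below `R`, `rsp = R − 8`, `rdi = f`. -/
theorem c5a_malloc_pre {u₀ : State} {g : Ghost} {i : Nat} {A2 A3 Ai : Arena} {A : Arena × List Obj} {pc : Word} {v s : State}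
    (hfr : Frame u₀ g pc A v) (hcur : Cur g i A2 A3 Ai A v) (hun : ShadowUntouched v.mem s.mem)
    (hmem : Mem.EqOn (g.f + 112) (g.f + 136) v.mem s.mem) (hrsp : (s.reg .rsp).toNat + 8 = g.R)
    (hrdi : (s.reg .rdi).toNat = g.f) : (setup_malloc.spec A.2 g.frames' A.1).pre s := by
  have hob := hcur.sd.bits.OB1
  obtain ⟨hf1, hf2, _⟩ := c5a_obj_where hcur hfr.shadow hfr.offText
  refine ⟨⟨?_, hfr.offText⟩, ?_, ?_, hcur.hand.arenaText⟩
  · rw [hrsp]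
    exact hfr.shadow.untouched hun
  · rw [hrdi]
    exact hcur.sd.env.live _ hob
  · rw [hrdi]
    apply hcur.sd.arena.frame (by simp only [voff]; omega)
    simp only [voff]
    exact hmem

end Vorbis.Spec.start_decoder_C5a
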